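-- pv_equiv track=rewrite | github.com/Kartikeybharti8/Code_Quotient_training | week2/cut_choco3.py | maxPieces
-- ===== SOURCE A (Python) =====
-- def maxPieces(k):
--   # Write your code here
--   a=0
--   r=0
--   c=0
--   for i in range(1,k+1):
--     for j in range(i,k+1):
--       if (i+j)==k and i*j>=r*c:
--         r=i
--         c=j
--   return r*c;
-- ===== SOURCE B (Python) =====
-- def maxPieces(k):
--     # closed form: the product i*j with i+j=k is maximised at the balanced split
--     return 0 if k < 2 else (k // 2) * ((k + 1) // 2)
-- ===== Notes on version B (the rewrite author's own statement) =====
-- stated objective: faster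
-- what changed: replaces the quadratic double loop over all pairs (i,j) by the closed-form balanced split of k into two floor/ceil halves
import Mathlib
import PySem

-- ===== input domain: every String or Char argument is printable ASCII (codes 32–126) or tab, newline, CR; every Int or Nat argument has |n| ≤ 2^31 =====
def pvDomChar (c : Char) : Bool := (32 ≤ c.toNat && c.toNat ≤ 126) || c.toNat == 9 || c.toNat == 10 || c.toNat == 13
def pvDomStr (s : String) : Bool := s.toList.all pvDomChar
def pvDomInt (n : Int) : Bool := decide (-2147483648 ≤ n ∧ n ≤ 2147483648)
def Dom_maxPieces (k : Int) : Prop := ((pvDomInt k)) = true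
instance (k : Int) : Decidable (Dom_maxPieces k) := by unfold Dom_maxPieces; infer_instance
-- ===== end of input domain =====

-- B replaces A's quadratic double loop by the O(1) closed form (k//2)*((k+1)//2) (0 for k < 2).

-- ===== PORT A =====
def maxPieces (k : Int) : Int :=
  -- a = 0 (unused), r = 0, c = 0; nested for-loops updating (r, c)
  let rc : Int × Int :=
    (PySem.List.pyRange 1 (k + 1) 1).foldl (fun rc i =>
      (PySem.List.pyRange i (k + 1) 1).foldl (fun rc j =>
        if i + j = k ∧ i * j ≥ rc.1 * rc.2 then (i, j) else rc) rc) (0, 0)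
  rc.1 * rc.2

-- ===== PORT B =====
def maxPieces_alt (k : Int) : Int :=
  if k < 2 then 0 else PySem.Int.floordiv k 2 * PySem.Int.floordiv (k + 1) 2

-- ===== PRECONDITION & SPEC =====
def Spec_maxPieces (k : Int) (out : Int) : Prop := out = maxPieces_alt k
instance (k : Int) (out : Int) : Decidable (Spec_maxPieces k out) := by unfold Spec_maxPieces; infer_instance

-- ===== CLAIM (what is proved, stated in full; the proofs are below) =====
def Claim_equal_maxPieces : Prop := ∀ (k : Int), Dom_maxPieces k → Spec_maxPieces k (maxPieces k)

-- ===== LEMMAS AND PROOFS =====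

-- Inner-loop step of A's port, named for the lemmas below.
def pvInner (k i : Int) (rc : Int × Int) (j : Int) : Int × Int :=
  if i + j = k ∧ i * j ≥ rc.1 * rc.2 then (i, j) else rc

-- On a range not containing k - i, the inner fold is the identity.
lemma pvInner_id (k i : Int) : ∀ (n : Nat) (a b : Int) (rc : Int × Int),
    (b - a).toNat = n → (k - i < a ∨ b ≤ k - i) →
    (PySem.List.pyRange a b 1).foldl (pvInner k i) rc = rc := by
  intro n
  induction n with
  | zero =>
    intro a b rc hn _
    rw [PySem.List.pyRange_one_eq_nil (by omega)]
    rfl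
  | succ m ih =>
    intro a b rc hn hout
    by_cases h : a < b
    case neg => rw [PySem.List.pyRange_one_eq_nil (by omega)]; rfl
    case pos =>
      rw [PySem.List.pyRange_one_cons h, List.foldl_cons]
      have hja : i + a ≠ k := by omega
      have hstep : pvInner k i rc a = rc := by
        simp [pvInner, hja]
      rw [hstep]
      exact ih (a + 1) b rc (by omega) (by omega)

-- The inner fold over range(i, k+1): at most one j (namely k - i) can fire.
lemma pvInner_fold (k i : Int) (hi : 1 ≤ i) (rc : Int × Int) :
    (PySem.List.pyRange i (k + 1) 1).foldl (pvInner k i) rc =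
      if 2 * i ≤ k ∧ i * (k - i) ≥ rc.1 * rc.2 then (i, k - i) else rc := by
  by_cases h2 : 2 * i ≤ k
  · have hsplit : PySem.List.pyRange i (k + 1) 1 =
        PySem.List.pyRange i (k - i) 1 ++ PySem.List.pyRange (k - i) (k + 1) 1 :=
      PySem.List.pyRange_one_append _ _ _ (by omega) (by omega)
    rw [hsplit, List.foldl_append,
        pvInner_id k i (k - i - i).toNat i (k - i) rc rfl (by omega),
        PySem.List.pyRange_one_cons (by omega), List.foldl_cons]
    have hfire : pvInner k i rc (k - i) =
        if i * (k - i) ≥ rc.1 * rc.2 then (i, k - i) else rc := by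
      simp [pvInner, show i + (k - i) = k by omega]
    rw [hfire]
    by_cases hp : i * (k - i) ≥ rc.1 * rc.2 <;>
      simp [hp, h2, pvInner_id k i (k + 1 - (k - i + 1)).toNat (k - i + 1) (k + 1) _ rfl (by omega)]
  · rw [pvInner_id k i (k + 1 - i).toNat i (k + 1) rc rfl (by omega)]
    simp [h2]

-- Invariant of the outer loop: after processing i = 1 .. n, the best pair so far.
lemma pvOuter_fold (k : Int) : ∀ (n : Int), 0 ≤ n →
    (PySem.List.pyRange 1 (n + 1) 1).foldl
        (fun rc i => (PySem.List.pyRange i (k + 1) 1).foldl (pvInner k i) rc) (0, 0) =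
      if 2 ≤ k ∧ 1 ≤ n then (min n (k / 2), k - min n (k / 2)) else (0, 0) := by
  intro n hn
  induction n, hn using Int.le_induction with
  | base =>
    rw [PySem.List.pyRange_one_eq_nil (by omega)]
    simp
  | succ m hm ih =>
    rw [PySem.List.pyRange_one_succ_right (by omega), List.foldl_append, ih, List.foldl_cons,
        List.foldl_nil, pvInner_fold k (m + 1) (by omega)]
    by_cases hk : 2 ≤ k
    · by_cases hfit : 2 * (m + 1) ≤ k
      · have hmin : min (m + 1) (k / 2) = m + 1 := by omega
        by_cases hm1 : 1 ≤ m
        · have hmn : min m (k / 2) ≤ m := by omega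
          have hle : min m (k / 2) * (k - min m (k / 2)) ≤ (m + 1) * (k - (m + 1)) := by
            have h1 : (0:Int) ≤ (m + 1) - min m (k / 2) := by omega
            have h2 : (0:Int) ≤ k - (m + 1) - min m (k / 2) := by omega
            nlinarith [mul_nonneg h1 h2]
          simp only [hk, hm1, and_self, if_true]
          rw [if_pos ⟨hfit, hle⟩]
          simp [hmin, show (1:Int) ≤ m + 1 by omega]
        · have hm0 : m = 0 := by omega
          subst hm0
          rw [if_neg (by omega : ¬(2 ≤ k ∧ (1:Int) ≤ 0))]
          rw [if_pos ⟨hfit, by simp; nlinarith⟩]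
          rw [if_pos (⟨hk, by omega⟩ : 2 ≤ k ∧ (1:Int) ≤ 0 + 1)]
          rw [show min ((0:Int)+1) (k/2) = 0+1 by omega]
      · have hm1 : 1 ≤ m := by omega
        have hmin : min (m + 1) (k / 2) = min m (k / 2) := by omega
        simp only [hk, hm1, and_self, if_true, ge_iff_le]
        rw [if_neg (by tauto)]
        simp [hmin, show (1:Int) ≤ m + 1 by omega]
    · have : ¬ (2 * (m + 1) ≤ k ∧ (m + 1) * (k - (m + 1)) ≥ (if 2 ≤ k ∧ 1 ≤ m then
          (min m (k / 2), k - min m (k / 2)) else ((0:Int), (0:Int))).1 *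
          (if 2 ≤ k ∧ 1 ≤ m then (min m (k / 2), k - min m (k / 2)) else ((0:Int), (0:Int))).2) := by
        intro h; omega
      rw [if_neg this]
      simp [hk]

-- ===== VERDICT (by name: the statement is the Claim_ definition above) =====
theorem maxPieces_spec : Claim_equal_maxPieces := by
  intro k _
  unfold Spec_maxPieces maxPieces maxPieces_alt
  show ((PySem.List.pyRange 1 (k + 1) 1).foldl
      (fun rc i => (PySem.List.pyRange i (k + 1) 1).foldl (pvInner k i) rc) (0, 0)).1 *
      ((PySem.List.pyRange 1 (k + 1) 1).foldl
      (fun rc i => (PySem.List.pyRange i (k + 1) 1).foldl (pvInner k i) rc) (0, 0)).2 = _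
  by_cases hk0 : 0 ≤ k
  · rw [pvOuter_fold k k hk0]
    by_cases hk : 2 ≤ k
    · have hmin : min k (k / 2) = k / 2 := by omega
      rw [if_pos ⟨hk, by omega⟩, if_neg (by omega : ¬ k < 2)]
      rw [PySem.Int.floordiv_eq_ediv_of_pos (by omega), PySem.Int.floordiv_eq_ediv_of_pos (by omega)]
      simp only [hmin]
      have : k - k / 2 = (k + 1) / 2 := by omega
      rw [this]
    · rw [if_neg (by omega), if_pos (by omega)]
      norm_num
  · rw [PySem.List.pyRange_one_eq_nil (by omega), if_pos (show k < 2 by omega)]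
    norm_num
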